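-- pv_equiv track=rewrite | github.com/Goodheart-Labs/anki-manager | text_to_anki.py | parse_line_by_line
-- ===== SOURCE A (Python) =====
-- from typing import List, Tuple, Optional
--
-- def parse_line_by_line(text: str) -> List[Tuple[str, str]]:
--     """Parse text where each line becomes front of card, next line is back."""
--     cards = []
--     lines = []
--
--     # Collect all non-empty lines
--     for line in text.strip().split('\n'):
--         line = line.strip()
--         if line:
--             lines.append(line)
--
--     # Create cards where each line leads to the next
--     for i in range(len(lines) - 1):
--         cards.append((lines[i], lines[i + 1]))
--
--     return cards
-- ===== SOURCE B (Python) =====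
-- def parse_line_by_line(text):
--     """Parse text where each line becomes front of card, next line is back."""
--     cards = []
--     previous = None
--     for line in text.strip().split('\n'):
--         line = line.strip()
--         if not line:
--             continue
--         if previous is not None:
--             cards.append((previous, line))
--         previous = line
--     return cards
-- ===== Notes on version B (the rewrite author's own statement) =====
-- stated objective: simpler
-- what changed: Single pass with a sliding last-seen-line accumulator pairing each non-empty line with the one before it, instead of materializing the list of non-empty lines and then pairing adjacent entries by index in a second loop.
import Mathlib
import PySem

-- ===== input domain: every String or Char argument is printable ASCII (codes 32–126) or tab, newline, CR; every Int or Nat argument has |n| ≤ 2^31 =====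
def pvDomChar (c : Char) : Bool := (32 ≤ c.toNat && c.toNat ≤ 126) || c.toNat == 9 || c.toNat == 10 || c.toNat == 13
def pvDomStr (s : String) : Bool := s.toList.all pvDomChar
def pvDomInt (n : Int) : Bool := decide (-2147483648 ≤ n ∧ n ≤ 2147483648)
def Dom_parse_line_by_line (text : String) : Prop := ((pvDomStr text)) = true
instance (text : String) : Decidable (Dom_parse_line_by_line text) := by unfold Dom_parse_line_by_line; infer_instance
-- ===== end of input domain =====

-- B replaces A's two-phase "collect non-empty lines, then pair by index" with a single pass
-- keeping the previously seen non-empty line as an accumulator (objective: simpler).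


-- ===== PORT A =====
-- 'line = line.strip(); if line: lines.append(line)' — step of A's first loop
def pvCollectStep (acc : List String) (line : String) : List String :=
  let l := PySem.Str.strip line
  if l ≠ "" then acc ++ [l] else acc

-- 'cards.append((lines[i], lines[i+1]))' — step of A's second loop
def pvPairStep (lines : List String) (cards : List (String × String)) (i : Int) :
    List (String × String) :=
  cards ++ [(PySem.List.pyGetD lines i "", PySem.List.pyGetD lines (i + 1) "")]

def parse_line_by_line (text : String) : List (String × String) :=
  let lines := ((PySem.Str.split? (PySem.Str.strip text) "\n").getD []).foldl pvCollectStep []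
  (PySem.List.pyRange 0 ((lines.length : Int) - 1) 1).foldl (pvPairStep lines) []

-- ===== PORT B =====
-- one step of B's single pass: strip, skip blanks, pair with the previous line
def pvPrevStep (st : Option String × List (String × String)) (line : String) :
    Option String × List (String × String) :=
  let l := PySem.Str.strip line
  if l = "" then st
  else
    match st.1 with
    | none => (some l, st.2)
    | some p => (some l, st.2 ++ [(p, l)])

def parse_line_by_line_alt (text : String) : List (String × String) :=
  (((PySem.Str.split? (PySem.Str.strip text) "\n").getD []).foldl pvPrevStep (none, [])).2

-- ===== PRECONDITION & SPEC =====
def Spec_parse_line_by_line (text : String) (out : List (String × String)) : Prop := out = parse_line_by_line_alt text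
instance (text : String) (out : List (String × String)) : Decidable (Spec_parse_line_by_line text out) := by unfold Spec_parse_line_by_line; infer_instance

-- ===== CLAIM (what is proved, stated in full; the proofs are below) =====
def Claim_equal_parse_line_by_line : Prop := ∀ (text : String), Dom_parse_line_by_line text → Spec_parse_line_by_line text (parse_line_by_line text)

-- ===== LEMMAS AND PROOFS =====

-- the list of adjacent pairs of a list
def pvAdj : List String → List (String × String)
  | [] => []
  | [_] => []
  | a :: b :: t => (a, b) :: pvAdj (b :: t)

-- keep the stripped form of a non-blank line
def pvKeep (line : String) : Option String :=
  let l := PySem.Str.strip line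
  if l = "" then none else some l

-- proof-only: B's step on an already stripped, non-blank line
def pvPrevStep' (st : Option String × List (String × String)) (l : String) :
    Option String × List (String × String) :=
  match st.1 with
  | none => (some l, st.2)
  | some p => (some l, st.2 ++ [(p, l)])

-- A's first loop materializes exactly the stripped non-empty lines
theorem collect_eq_filterMap (raw : List String) (acc : List String) :
    raw.foldl pvCollectStep acc = acc ++ raw.filterMap pvKeep := by
  induction raw generalizing acc with
  | nil => simp
  | cons x t ih =>
    by_cases h : PySem.Str.strip x = "" <;>
      simp [pvCollectStep, pvKeep, h, ih]

-- A's index loop computes the adjacent pairs of the collected list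
theorem range_pairs_eq_adj (L : List String) :
    (List.range (L.length - 1)).map
      (fun k => (L.getD k "", L.getD (k + 1) "")) = pvAdj L := by
  induction L with
  | nil => simp [pvAdj]
  | cons a t ih =>
    match t with
    | [] => simp [pvAdj]
    | b :: u =>
      have hlen : (a :: b :: u).length - 1 = (b :: u).length - 1 + 1 := by
        simp [List.length_cons]
      rw [pvAdj, ← ih, hlen, List.range_succ_eq_map]
      simp [List.map_map, Function.comp_def]

-- B's pass over the stripped non-blank lines, with `p` the last line seen so far
theorem prev_fold_some (L : List String) (p : String) (acc : List (String × String)) :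
    (L.foldl pvPrevStep' (some p, acc)).2 = acc ++ pvAdj (p :: L) := by
  induction L generalizing p acc with
  | nil => simp [pvAdj]
  | cons a t ih =>
    simp only [List.foldl_cons, pvPrevStep']
    rw [ih, pvAdj]
    simp

theorem prev_fold_none (L : List String) :
    (L.foldl pvPrevStep' (none, [])).2 = pvAdj L := by
  match L with
  | [] => simp [pvAdj]
  | a :: t =>
    simp only [List.foldl_cons, pvPrevStep']
    simpa using prev_fold_some t a []

-- fusing B's pass: skipping blanks inline = passing over the filtered stripped list
theorem prev_fold_fuse (raw : List String) (st : Option String × List (String × String)) :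
    raw.foldl pvPrevStep st = (raw.filterMap pvKeep).foldl pvPrevStep' st := by
  induction raw generalizing st with
  | nil => rfl
  | cons x t ih =>
    by_cases h : PySem.Str.strip x = "" <;>
      simp [pvPrevStep, pvPrevStep', pvKeep, h, ih]

-- ===== VERDICT (by name: the statement is the Claim_ definition above) =====
theorem parse_line_by_line_spec : Claim_equal_parse_line_by_line := by
  intro text _
  show parse_line_by_line text = parse_line_by_line_alt text
  unfold parse_line_by_line parse_line_by_line_alt
  set raw := (PySem.Str.split? (PySem.Str.strip text) "\n").getD [] with hraw
  rw [show raw.foldl pvCollectStep [] = raw.filterMap pvKeep from by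
        simpa using collect_eq_filterMap raw []]
  set L := raw.filterMap pvKeep with hL
  rw [prev_fold_fuse, prev_fold_none]
  show (PySem.List.pyRange 0 ((L.length : Int) - 1) 1).foldl (pvPairStep L) [] = pvAdj L
  rw [PySem.List.pyRange_one]
  unfold pvPairStep
  rw [PySem.List.foldl_append_singleton_eq_map]
  rw [← range_pairs_eq_adj L]
  have : ((L.length : Int) - 1 - 0).toNat = L.length - 1 := by omega
  rw [this, List.map_map, List.nil_append]
  refine List.map_congr_left (fun k hk => ?_)
  have h1 : (0 : Int) + (k : Int) = ((k : ℕ) : Int) := by ring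
  have h3 : (k : Int) + 1 = ((k + 1 : ℕ) : Int) := by push_cast; ring
  simp only [Function.comp_apply, h1, h3, PySem.List.pyGetD_natCast, List.getD_eq_getElem?_getD]
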